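-- pv_equiv track=rewrite | github.com/alexNgari/hackerrank | maximalCommonality/maximalCommonality.py | findCommonality
-- ===== SOURCE A (Python) =====
-- def findCommonality(inputStr):
--     inputStr = list(inputStr)
--     commonalities = []
--     for i in range(len(inputStr)-2):
--         commonChars = set(inputStr[:i+1]).intersection(set(inputStr[i+1:]))
--         commonality = 0
--         for x in commonChars:
--             commonality += min([inputStr[:i+1].count(x)]+[inputStr[i+1:].count(x)])
--         # commonalities.append(sum[(min([inputStr[:i+1].count(x)].append(inputStr[i+1:].count(x)))) for x in commonChars])
--         commonalities.append(commonality)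
--     return max(commonalities)
-- ===== SOURCE B (Python) =====
-- def findCommonality(inputStr):
--     s = list(inputStr)
--     left = {}
--     right = {}
--     for c in s:
--         right[c] = right.get(c, 0) + 1
--     total = 0
--     best = None
--     for c in s[:len(s) - 2]:
--         l = left.get(c, 0)
--         r = right[c]
--         total += min(l + 1, r - 1) - min(l, r)
--         left[c] = l + 1
--         right[c] = r - 1
--         if best is None or total > best:
--             best = total
--     return best
-- ===== Notes on version B (the rewrite author's own statement) =====
-- stated objective: faster
-- what changed: Instead of recomputing prefix/suffix sets and character counts from scratch at every split (quadratic rescans), B keeps left/right count dictionaries and updates the min-sum total by an O(1) delta per split while tracking the running maximum.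
import Mathlib
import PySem

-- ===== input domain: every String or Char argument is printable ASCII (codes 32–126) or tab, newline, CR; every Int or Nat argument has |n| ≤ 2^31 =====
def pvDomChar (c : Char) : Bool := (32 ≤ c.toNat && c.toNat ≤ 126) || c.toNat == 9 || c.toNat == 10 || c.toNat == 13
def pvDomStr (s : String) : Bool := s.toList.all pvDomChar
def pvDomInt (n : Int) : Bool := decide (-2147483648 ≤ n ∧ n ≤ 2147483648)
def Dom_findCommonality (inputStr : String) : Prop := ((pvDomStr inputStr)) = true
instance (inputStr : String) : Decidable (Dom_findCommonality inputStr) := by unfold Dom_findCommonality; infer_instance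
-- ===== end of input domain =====

-- B replaces A's per-split rescans of both halves by incremental left/right count
-- dictionaries with an O(1) delta to the min-sum total per split (objective: faster).

-- ===== PORT A =====
def findCommonality (inputStr : String) : Int :=
  let s := inputStr.toList
  let commonalities := (PySem.List.pyRange 0 ((s.length : Int) - 2) 1).foldl
    (fun (acc : List Int) (i : Int) =>
      let left := PySem.List.slice s none (some (i + 1))
      let right := PySem.List.slice s (some (i + 1)) none
      let commonChars := PySem.Set.inter (PySem.Set.ofList left) (PySem.Set.ofList right)
      let commonality := commonChars.foldl
        (fun (c : Int) (x : Char) =>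
          c + min ((PySem.List.count left x : Int)) ((PySem.List.count right x : Int))) 0
      acc ++ [commonality]) []
  -- max([]) raises ValueError: excluded by Pre_
  (PySem.List.max? commonalities (fun y => y)).getD 0

-- ===== PORT B =====
def findCommonality_alt (inputStr : String) : Int :=
  let s := inputStr.toList
  let right0 := s.foldl (fun (d : PySem.Dict Char Int) c => d.insert c (d.getD c 0 + 1)) PySem.Dict.empty
  let fin := (PySem.List.slice s none (some ((s.length : Int) - 2))).foldl
    (fun (st : PySem.Dict Char Int × PySem.Dict Char Int × Int × Option Int) c =>
      let l := st.1.getD c 0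
      let r := st.2.1.getD c 0   -- exact: c ∈ s, so c is always a key of the right dict ('right[c]' never raises)
      let total := st.2.2.1 + (min (l + 1) (r - 1) - min l r)
      let best := match st.2.2.2 with
        | none => some total
        | some b => if total > b then some total else some b
      (st.1.insert c (l + 1), st.2.1.insert c (r - 1), total, best))
    (PySem.Dict.empty, right0, 0, none)
  -- none only when the loop never ran (len < 3, where Python B returns None); excluded by Pre_
  fin.2.2.2.getD 0

-- ===== PRECONDITION & SPEC =====
-- Pre_ excludes strings of length < 3, on which A raises ValueError (max of an empty list).
def Pre_findCommonality (inputStr : String) : Prop := 3 ≤ inputStr.toList.length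
instance (inputStr : String) : Decidable (Pre_findCommonality inputStr) := by unfold Pre_findCommonality; infer_instance
def pvWitness_findCommonality : String := "abc"
def Spec_findCommonality (inputStr : String) (out : Int) : Prop := out = findCommonality_alt inputStr
instance (inputStr : String) (out : Int) : Decidable (Spec_findCommonality inputStr out) := by unfold Spec_findCommonality; infer_instance

-- ===== CLAIM (what is proved, stated in full; the proofs are below) =====
def Claim_equal_findCommonality : Prop := ∀ (inputStr : String), Dom_findCommonality inputStr → Pre_findCommonality inputStr → Spec_findCommonality inputStr (findCommonality inputStr)

-- ===== LEMMAS AND PROOFS =====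


def gmin (s : List Char) (k : Nat) (x : Char) : Int :=
  min (((s.take k).count x : Nat) : Int) (((s.drop k).count x : Nat) : Int)

def Fsum (s : List Char) (k : Nat) : Int := ∑ x ∈ s.toFinset, gmin s k x

def obmax (b : Option Int) (v : Int) : Option Int :=
  some (match b with | none => v | some x => max x v)

theorem innerSumEq (s : List Char) (k : Nat) :
    (PySem.Set.inter (PySem.Set.ofList (s.take k)) (PySem.Set.ofList (s.drop k))).foldl
      (fun (c : Int) (x : Char) =>
        c + min ((PySem.List.count (s.take k) x : Int)) ((PySem.List.count (s.drop k) x : Int))) 0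
    = Fsum s k := by
  rw [PySem.List.foldl_add, zero_add]
  set L := PySem.Set.inter (PySem.Set.ofList (s.take k)) (PySem.Set.ofList (s.drop k)) with hL
  have hnd : L.Nodup := PySem.Set.nodup_inter _ _ (PySem.Set.nodup_ofList _)
  rw [← List.sum_toFinset _ hnd]
  unfold Fsum gmin
  simp only [PySem.List.count_eq]
  have hsub : L.toFinset ⊆ s.toFinset := by
    intro x hx
    simp only [List.mem_toFinset] at *
    have h2 := (PySem.Set.mem_inter (s := PySem.Set.ofList (s.take k)) (t := PySem.Set.ofList (s.drop k)) (y := x)).mp hx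
    have hx1 : x ∈ s.take k := by simpa [PySem.Set.mem_ofList] using h2.1
    exact List.mem_of_mem_take hx1
  apply Finset.sum_subset hsub
  intro x hxs hxL
  simp only [List.mem_toFinset] at hxs hxL
  rw [hL, PySem.Set.mem_inter] at hxL
  push Not at hxL
  simp only [PySem.Set.mem_ofList] at hxL
  by_cases h1 : x ∈ s.take k
  · have h2 : x ∉ s.drop k := hxL h1
    have : (s.drop k).count x = 0 := List.count_eq_zero.mpr h2
    rw [this]
    have : (0:Int) ≤ ((s.take k).count x : Int) := by positivity
    omega
  · have : (s.take k).count x = 0 := List.count_eq_zero.mpr h1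
    rw [this]
    have : (0:Int) ≤ ((s.drop k).count x : Int) := by positivity
    omega

theorem Fsum_zero (s : List Char) : Fsum s 0 = 0 := by
  unfold Fsum
  apply Finset.sum_eq_zero
  intro x hx
  simp [gmin]

theorem Fsum_succ (p u : List Char) (c : Char) :
    Fsum (p ++ c :: u) (p.length + 1)
      = Fsum (p ++ c :: u) p.length
        + (min ((p.count c : Int) + 1) (((c :: u).count c : Int) - 1)
           - min ((p.count c : Int)) (((c :: u).count c : Int))) := by
  have htake0 : (p ++ c :: u).take p.length = p := by
    simp
  have hdrop0 : (p ++ c :: u).drop p.length = c :: u := by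
    simp
  have htake1 : (p ++ c :: u).take (p.length + 1) = p ++ [c] := by
    rw [List.take_append]
    simp
  have hdrop1 : (p ++ c :: u).drop (p.length + 1) = u := by
    rw [List.drop_append]
    simp
  have hpt : ∀ x, gmin (p ++ c :: u) (p.length + 1) x
      = gmin (p ++ c :: u) p.length x
        + (if x = c then (min ((p.count c : Int) + 1) (((c :: u).count c : Int) - 1)
             - min ((p.count c : Int)) (((c :: u).count c : Int))) else 0) := by
    intro x
    unfold gmin
    rw [htake0, hdrop0, htake1, hdrop1]
    by_cases hxc : x = c
    · subst hxc
      rw [if_pos rfl]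
      simp only [List.count_append, List.count_cons, List.count_nil, beq_self_eq_true, if_true]
      push_cast
      omega
    · rw [if_neg hxc]
      have hb : (c == x) = false := beq_eq_false_iff_ne.mpr (fun h => hxc h.symm)
      simp only [List.count_append, List.count_cons, List.count_nil, hb]
      simp
  unfold Fsum
  rw [Finset.sum_congr rfl (fun x _ => hpt x), Finset.sum_add_distrib]
  congr 1
  rw [Finset.sum_ite_eq' _ c]
  simp

theorem foldl_obmax_some (t : List Int) : ∀ (a : Int), t.foldl obmax (some a) = some (t.foldl max a) := by
  induction t with
  | nil => intro a; rfl
  | cons v t ih =>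
    intro a
    simp only [List.foldl_cons]
    rw [show obmax (some a) v = some (max a v) from rfl, ih]

theorem pyRange_zero_natCast (m : Nat) :
    PySem.List.pyRange 0 (m : Int) 1 = (List.range m).map (fun j : Nat => (j : Int)) := by
  induction m with
  | zero => simp [PySem.List.pyRange_one_eq_nil]
  | succ m ih =>
    rw [show ((m + 1 : Nat) : Int) = (m : Int) + 1 by push_cast; ring,
        PySem.List.pyRange_one_succ_right (by positivity), ih, List.range_succ]
    simp

theorem obmax_step (b : Option Int) (v : Int) :
    (match b with
      | none => some v
      | some x => if v > x then some v else some x) = obmax b v := by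
  cases b with
  | none => rfl
  | some x =>
    simp only [obmax]
    split_ifs with h
    · simp [max_eq_right (le_of_lt h)]
    · simp [max_eq_left (le_of_not_gt h)]

def bstep (st : PySem.Dict Char Int × PySem.Dict Char Int × Int × Option Int) (c : Char) :
    PySem.Dict Char Int × PySem.Dict Char Int × Int × Option Int :=
  let l := st.1.getD c 0
  let r := st.2.1.getD c 0
  let total := st.2.2.1 + (min (l + 1) (r - 1) - min l r)
  let best := match st.2.2.2 with
    | none => some total
    | some b => if total > b then some total else some b
  (st.1.insert c (l + 1), st.2.1.insert c (r - 1), total, best)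

theorem loop_inv (u : List Char) (t : List Char) :
    ∀ (p : List Char) (dl dr : PySem.Dict Char Int) (total : Int) (best : Option Int),
    (∀ x, dl.getD x 0 = ((p.count x : Nat) : Int)) →
    (∀ x, dr.getD x 0 = (((t ++ u).count x : Nat) : Int)) →
    total = Fsum (p ++ (t ++ u)) p.length →
    (∀ x, (t.foldl bstep (dl, dr, total, best)).1.getD x 0 = (((p ++ t).count x : Nat) : Int)) ∧
    (∀ x, (t.foldl bstep (dl, dr, total, best)).2.1.getD x 0 = ((u.count x : Nat) : Int)) ∧
    (t.foldl bstep (dl, dr, total, best)).2.2.1 = Fsum (p ++ (t ++ u)) (p.length + t.length) ∧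
    (t.foldl bstep (dl, dr, total, best)).2.2.2
      = ((List.range t.length).map (fun j => Fsum (p ++ (t ++ u)) (p.length + j + 1))).foldl obmax best := by
  induction t with
  | nil =>
    intro p dl dr total best hdl hdr htot
    simpa using ⟨hdl, hdr, htot⟩
  | cons c t ih =>
    intro p dl dr total best hdl hdr htot
    simp only [List.foldl_cons]
    have hstep : bstep (dl, dr, total, best) c =
        (dl.insert c (dl.getD c 0 + 1), dr.insert c (dr.getD c 0 - 1),
         total + (min (dl.getD c 0 + 1) (dr.getD c 0 - 1) - min (dl.getD c 0) (dr.getD c 0)),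
         obmax best (total + (min (dl.getD c 0 + 1) (dr.getD c 0 - 1) - min (dl.getD c 0) (dr.getD c 0)))) := by
      rw [← obmax_step]
      rfl
    rw [hstep]
    -- the new intermediate values
    have hl : dl.getD c 0 = ((p.count c : Nat) : Int) := hdl c
    have hr : dr.getD c 0 = (((c :: (t ++ u)).count c : Nat) : Int) := by
      rw [hdr c]; simp
    have hdl' : ∀ x, (dl.insert c (dl.getD c 0 + 1)).getD x 0 = (((p ++ [c]).count x : Nat) : Int) := by
      intro x
      rw [PySem.Dict.getD_insert]
      by_cases hx : x = c
      · subst hx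
        rw [if_pos rfl, hdl x]
        simp
      · rw [if_neg hx, hdl x]
        have hb : (c == x) = false := beq_eq_false_iff_ne.mpr (fun h => hx h.symm)
        simp [List.count_append, List.count_cons, hb]
    have hdr' : ∀ x, (dr.insert c (dr.getD c 0 - 1)).getD x 0 = (((t ++ u).count x : Nat) : Int) := by
      intro x
      rw [PySem.Dict.getD_insert]
      by_cases hx : x = c
      · subst hx
        rw [if_pos rfl, hdr x]
        simp
      · rw [if_neg hx, hdr x]
        simp [Ne.symm hx]
    have htot' : total + (min (dl.getD c 0 + 1) (dr.getD c 0 - 1) - min (dl.getD c 0) (dr.getD c 0))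
        = Fsum ((p ++ [c]) ++ (t ++ u)) (p ++ [c]).length := by
      have := Fsum_succ p (t ++ u) c
      rw [hl, hr, htot]
      simp only [List.append_assoc, List.cons_append, List.nil_append, List.length_append,
        List.length_cons, List.length_nil]
      rw [this]
    obtain ⟨ih1, ih2, ih3, ih4⟩ := ih (p ++ [c])
      (dl.insert c (dl.getD c 0 + 1)) (dr.insert c (dr.getD c 0 - 1)) _
      (obmax best (total + (min (dl.getD c 0 + 1) (dr.getD c 0 - 1) - min (dl.getD c 0) (dr.getD c 0))))
      hdl' hdr' htot'
    refine ⟨?_, ?_, ?_, ?_⟩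
    · intro x
      rw [ih1 x]
      simp
    · exact ih2
    · rw [ih3]
      simp only [List.append_assoc, List.cons_append, List.nil_append, List.length_append,
        List.length_cons, List.length_nil]
      ring_nf
    · rw [ih4]
      simp only [List.append_assoc, List.cons_append, List.nil_append, List.length_append,
        List.length_cons, List.length_nil, List.range_succ_eq_map, List.map_cons, List.map_map]
      rw [List.foldl_cons]
      have h0 : total + (min (dl.getD c 0 + 1) (dr.getD c 0 - 1) - min (dl.getD c 0) (dr.getD c 0))
          = Fsum (p ++ c :: (t ++ u)) (p.length + 0 + 1) := by
        rw [htot']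
        simp
      rw [← h0]
      congr 1
      apply List.map_congr_left
      intro j hj
      simp only [Function.comp_apply]
      congr 1
      omega

theorem alt_eq (inputStr : String) :
    findCommonality_alt inputStr =
      (((PySem.List.slice inputStr.toList none (some ((inputStr.toList.length : Int) - 2))).foldl
        bstep
        (PySem.Dict.empty,
         inputStr.toList.foldl (fun (d : PySem.Dict Char Int) c => d.insert c (d.getD c 0 + 1)) PySem.Dict.empty,
         0, none)).2.2.2).getD 0 := rfl

theorem alt_char (inputStr : String) (h : 3 ≤ inputStr.toList.length) :
    findCommonality_alt inputStr =
      (((List.range (inputStr.toList.length - 2)).map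
          (fun j => Fsum inputStr.toList (j + 1))).foldl obmax none).getD 0 := by
  rw [alt_eq]
  have hcast : ((inputStr.toList.length : Int) - 2) = ((inputStr.toList.length - 2 : Nat) : Int) := by
    omega
  rw [hcast, PySem.List.slice_to_natCast]
  obtain ⟨h1, h2, h3, h4⟩ := loop_inv (inputStr.toList.drop (inputStr.toList.length - 2))
      (inputStr.toList.take (inputStr.toList.length - 2)) [] PySem.Dict.empty
      (inputStr.toList.foldl (fun (d : PySem.Dict Char Int) c => d.insert c (d.getD c 0 + 1)) PySem.Dict.empty)
      0 none
      (fun x => by simp [PySem.Dict.getD_empty])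
      (fun x => by
        rw [List.take_append_drop, PySem.Dict.getD_foldl_insert_add_one]
        simp)
      (by
        rw [List.nil_append, List.take_append_drop]
        simp [Fsum_zero])
  rw [h4]
  congr 2
  rw [List.nil_append, List.take_append_drop, List.length_take]
  have hmin : min (inputStr.toList.length - 2) inputStr.toList.length = inputStr.toList.length - 2 := by
    omega
  rw [hmin]
  apply List.map_congr_left
  intro j hj
  simp

theorem a_char (inputStr : String) (h : 3 ≤ inputStr.toList.length) :
    findCommonality inputStr =
      (PySem.List.max? ((List.range (inputStr.toList.length - 2)).map
          (fun j => Fsum inputStr.toList (j + 1))) (fun y => y)).getD 0 := by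
  simp only [findCommonality]
  have hcast : ((inputStr.toList.length : Int) - 2) = ((inputStr.toList.length - 2 : Nat) : Int) := by
    omega
  rw [hcast, pyRange_zero_natCast, PySem.List.foldl_append_singleton_eq_map, List.nil_append]
  refine congrArg (fun L => (PySem.List.max? L (fun y => y)).getD 0) ?_
  rw [List.map_map]
  apply List.map_congr_left
  intro j hj
  simp only [Function.comp_apply]
  have hcast2 : ((j : Int) + 1) = (((j + 1 : Nat)) : Int) := by push_cast; ring
  rw [hcast2, PySem.List.slice_to_natCast, PySem.List.slice_from_natCast]
  exact innerSumEq inputStr.toList (j + 1)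

-- ===== VERDICT (by name: the statement is the Claim_ definition above) =====
theorem findCommonality_spec : Claim_equal_findCommonality := by
  intro inputStr _ hPre
  unfold Spec_findCommonality
  replace hPre : 3 ≤ inputStr.toList.length := hPre
  rw [a_char inputStr hPre, alt_char inputStr hPre]
  obtain ⟨m, hm⟩ : ∃ m, inputStr.toList.length - 2 = m + 1 :=
    ⟨inputStr.toList.length - 3, by omega⟩
  rw [hm, List.range_succ_eq_map, List.map_cons, PySem.List.max?_id_cons, List.foldl_cons,
    show obmax none (Fsum inputStr.toList (0 + 1)) = some (Fsum inputStr.toList (0 + 1)) from rfl,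
    foldl_obmax_some]
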